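-- pv_equiv track=rewrite | github.com/shhuan1989/algorithms | codechef/JAN20B_CHFDORA.py | solve
-- ===== SOURCE A (Python) =====
-- def manacher(row):
--     nrow = len(row)
--     m = [0 for _ in range(nrow)]
--
--     # maxRight是已经触及的最右端点，pos是此时的中心位置
--     maxRight, pos = 0, 0
--     for i, v in enumerate(row):
--         # 本问题只处理奇数长度，实际的Manacher可以通过添加#来把偶数长度变成奇数。
--         # 注意右边这个min
--         l = 1 if i >= maxRight else min(m[pos*2-i], maxRight-i)
--         while i + l < nrow and i - l >= 0 and row[i + l] == row[i - l]:
--             l += 1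
--         l -= 1
--         m[i] = l
--
--         # 值有大于的时候才需要更新pos
--         if i + l > maxRight:
--             maxRight = i + l
--             pos = i
--     return m
--
-- def solve(A, N, M):
--     manacherRow = []
--     for row in A:
--         manacherRow.append(manacher(row))
--
--     manacherCol = [[0 for _ in range(M)] for _ in range(N)]
--     for c, col in enumerate([[A[r][c] for r in range(N)] for c in range(M)]):
--         m = manacher(col)
--         for r, v in enumerate(m):
--             manacherCol[r][c] = v
--
--     ans = M * N
--     for r in range(N):
--         for c in range(M):
--             ans += min(manacherRow[r][c], manacherCol[r][c])
--
--     return ans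
-- ===== SOURCE B (Python) =====
-- def solve(A, N, M):
--     if M <= 0:
--         return N * M
--     total = N * M
--     for r in range(N):
--         row = A[r]
--         L = len(row)
--         for c in range(M):
--             p = 0
--             while p + 1 <= c and c + p + 1 < L and row[c - p - 1] == row[c + p + 1]:
--                 p += 1
--             q = 0
--             while q + 1 <= r and r + q + 1 < N and A[r - q - 1][c] == A[r + q + 1][c]:
--                 q += 1
--             total += min(p, q)
--     return total
-- ===== Notes on version B (the rewrite author's own statement) =====
-- stated objective: simpler
-- what changed: Replaces Manacher's algorithm with its precomputed row/column radius tables by a direct center-expansion at each cell (row radius and column radius expanded on the spot), keeping only a running total; Pre_ excludes exactly the inputs where A raises IndexError (N exceeding the row count or one of the first N rows shorter than M, with N,M positive).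
import Mathlib
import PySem

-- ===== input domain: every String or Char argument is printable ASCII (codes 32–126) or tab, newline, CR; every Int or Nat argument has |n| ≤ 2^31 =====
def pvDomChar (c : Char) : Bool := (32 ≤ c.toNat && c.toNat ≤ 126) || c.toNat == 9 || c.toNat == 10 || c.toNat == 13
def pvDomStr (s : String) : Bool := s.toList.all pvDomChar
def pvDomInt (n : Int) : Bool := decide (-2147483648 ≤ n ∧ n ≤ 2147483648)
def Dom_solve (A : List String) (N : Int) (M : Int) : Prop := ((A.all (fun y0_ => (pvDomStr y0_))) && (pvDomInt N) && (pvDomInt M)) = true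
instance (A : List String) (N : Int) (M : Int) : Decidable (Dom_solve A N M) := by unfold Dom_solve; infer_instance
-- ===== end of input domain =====

-- B replaces A's Manacher tables with direct center-expansion at every cell: simpler, no precomputed arrays.

-- ===== PORT A =====
-- A's inner while-condition: `i + l < nrow and i - l >= 0 and row[i+l] == row[i-l]`.
abbrev Cond (xs : List Char) (i k : Nat) : Prop :=
  i + k < xs.length ∧ k ≤ i ∧ xs.getD (i + k) ' ' = xs.getD (i - k) ' '

-- A's inner `while <Cond>: l += 1`; returns the final l.
def mLoopF : Nat → List Char → Nat → Nat → Nat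
  | 0, _, _, l => l
  | fuel + 1, xs, i, l =>
    if Cond xs i l then mLoopF fuel xs i (l + 1) else l

-- fuel = xs.length always suffices: the condition forces i + l < xs.length, so at most
-- xs.length - l < xs.length iterations happen.
def mLoop (xs : List Char) (i l : Nat) : Nat := mLoopF xs.length xs i l

-- A's `for i, v in enumerate(row)` loop with state (m, maxRight, pos); m preallocated with zeros.
def manacherAux : Nat → List Char → List Nat → Nat → Nat → Nat → List Nat
  | 0, _, m, _, _, _ => m
  | fuel + 1, xs, m, maxRight, pos, i =>
    if i < xs.length then
      let l := mLoop xs i (if maxRight ≤ i then 1 else min (m.getD (pos * 2 - i) 0) (maxRight - i)) - 1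
      if maxRight < i + l then manacherAux fuel xs (m.set i l) (i + l) i (i + 1)
      else manacherAux fuel xs (m.set i l) maxRight pos (i + 1)
    else m

-- fuel = xs.length suffices: i increases by 1 each iteration and stops at xs.length.
def manacher (xs : List Char) : List Nat :=
  manacherAux xs.length xs (List.replicate xs.length 0) 0 0 0

def solve (A : List String) (N : Int) (M : Int) : Int :=
  let manacherRow := A.map (fun row => manacher row.toList)
  let cols := (List.range M.toNat).map
    (fun c => (List.range N.toNat).map (fun r => ((A.getD r "").toList).getD c ' '))
  let colM := cols.map manacher
  let manacherCol := (List.range N.toNat).map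
    (fun r => (List.range M.toNat).map (fun c => (colM.getD c []).getD r 0))
  (List.range N.toNat).foldl (fun ans r =>
    (List.range M.toNat).foldl (fun ans c =>
      ans + Int.ofNat (min ((manacherRow.getD r []).getD c 0) ((manacherCol.getD r []).getD c 0))) ans)
    (M * N)

-- ===== PORT B =====
def getCell (A : List String) (r c : Nat) : Char := ((A.getD r "").toList).getD c ' '

-- B's row expansion: p = 0; while c-p-1 >= 0 and c+p+1 < L and row[c-p-1] == row[c+p+1]: p += 1
def expandPF : Nat → List Char → Nat → Nat → Nat
  | 0, _, _, p => p
  | fuel + 1, xs, c, p =>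
    if p + 1 ≤ c ∧ c + p + 1 < xs.length ∧ xs.getD (c - (p + 1)) ' ' = xs.getD (c + p + 1) ' ' then
      expandPF fuel xs c (p + 1)
    else p

-- fuel = xs.length suffices: the condition forces c + p + 1 < xs.length.
def expandP (xs : List Char) (c p : Nat) : Nat := expandPF xs.length xs c p

-- B's column expansion, directly on the grid: while r-q-1 >= 0 and r+q+1 < N and A[r-q-1][c] == A[r+q+1][c]
def expandQF : Nat → List String → Nat → Nat → Nat → Nat → Nat
  | 0, _, _, _, _, q => q
  | fuel + 1, A, n, r, c, q =>
    if q + 1 ≤ r ∧ r + q + 1 < n ∧ getCell A (r - (q + 1)) c = getCell A (r + q + 1) c then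
      expandQF fuel A n r c (q + 1)
    else q

-- fuel = n suffices: the condition forces r + q + 1 < n.
def expandQ (A : List String) (n r c q : Nat) : Nat := expandQF n A n r c q

def solve_alt (A : List String) (N : Int) (M : Int) : Int :=
  if M ≤ 0 then N * M else
  (List.range N.toNat).foldl (fun total r =>
    (List.range M.toNat).foldl (fun total c =>
      total + Int.ofNat (min (expandP (A.getD r "").toList c 0) (expandQ A N.toNat r c 0))) total)
    (N * M)

-- ===== PRECONDITION & SPEC =====
-- Pre_ excludes exactly the inputs where A raises an IndexError: N > 0 and M > 0 with
-- N exceeding the number of rows, or one of the first N rows shorter than M.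
def Pre_solve (A : List String) (N : Int) (M : Int) : Prop :=
  M ≤ 0 ∨ N ≤ 0 ∨ ((N : Int) ≤ A.length ∧ ∀ row ∈ A.take N.toNat, (M : Int) ≤ row.length)
instance (A : List String) (N : Int) (M : Int) : Decidable (Pre_solve A N M) := by
  unfold Pre_solve; infer_instance

def pvWitness_solve : List String × Int × Int := (["ab", "ba"], 2, 2)

def Spec_solve (A : List String) (N : Int) (M : Int) (out : Int) : Prop := out = solve_alt A N M
instance (A : List String) (N : Int) (M : Int) (out : Int) : Decidable (Spec_solve A N M out) := by
  unfold Spec_solve; infer_instance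

-- ===== CLAIM (what is proved, stated in full; the proofs are below) =====
def Claim_equal_solve : Prop := ∀ (A : List String) (N : Int) (M : Int), Dom_solve A N M → Pre_solve A N M → Spec_solve A N M (solve A N M)

-- ===== LEMMAS AND PROOFS =====


/-- The odd-palindrome radius at center `i` (what both programs' loops compute). -/
def rad (xs : List Char) (i : Nat) : Nat := mLoop xs i 1 - 1

theorem mLoopF_stop (f : Nat) (xs : List Char) (i l : Nat) (h : ¬ Cond xs i l) :
    mLoopF f xs i l = l := by
  cases f with
  | zero => rfl
  | succ f => rw [mLoopF, if_neg h]

theorem mLoopF_fuel (f1 : Nat) (xs : List Char) (i : Nat) :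
    ∀ f2 l, xs.length - l ≤ f1 → xs.length - l ≤ f2 → mLoopF f1 xs i l = mLoopF f2 xs i l := by
  induction f1 with
  | zero =>
      intro f2 l h1 h2
      have hc : ¬ Cond xs i l := by rintro ⟨a, -, -⟩; omega
      rw [mLoopF_stop 0 xs i l hc, mLoopF_stop f2 xs i l hc]
  | succ f ih =>
      intro f2 l h1 h2
      by_cases hc : Cond xs i l
      · match f2 with
        | 0 => exact absurd hc.1 (by omega)
        | f2 + 1 =>
          rw [mLoopF, mLoopF, if_pos hc, if_pos hc]
          exact ih f2 (l + 1) (by have := hc.1; omega) (by have := hc.1; omega)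
      · rw [mLoopF_stop _ xs i l hc, mLoopF_stop _ xs i l hc]

theorem mLoop_step (xs : List Char) (i l : Nat) (h : Cond xs i l) :
    mLoop xs i l = mLoop xs i (l + 1) := by
  unfold mLoop
  rw [mLoopF_fuel xs.length xs i (xs.length + 1) l (by omega) (by omega),
      mLoopF, if_pos h]

theorem mLoop_stop (xs : List Char) (i l : Nat) (h : ¬ Cond xs i l) :
    mLoop xs i l = l :=
  mLoopF_stop xs.length xs i l h

theorem mLoop_spec_aux (xs : List Char) (i : Nat) :
    ∀ fuel l, xs.length - l ≤ fuel →
      l ≤ mLoop xs i l ∧ ¬ Cond xs i (mLoop xs i l) ∧ ∀ k, l ≤ k → k < mLoop xs i l → Cond xs i k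
  | 0, l, hf => by
      have hc : ¬ Cond xs i l := by rintro ⟨h1, -, -⟩; omega
      rw [mLoop_stop xs i l hc]
      exact ⟨le_refl _, hc, fun k hk1 hk2 => absurd hk2 (by omega)⟩
  | fuel + 1, l, hf => by
      by_cases hc : Cond xs i l
      · rw [mLoop_step xs i l hc]
        have ih := mLoop_spec_aux xs i fuel (l + 1) (by have := hc.1; omega)
        refine ⟨by have := ih.1; omega, ih.2.1, fun k hk1 hk2 => ?_⟩
        rcases Nat.eq_or_lt_of_le hk1 with rfl | hlt
        · exact hc
        · exact ih.2.2 k hlt hk2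
      · rw [mLoop_stop xs i l hc]
        exact ⟨le_refl _, hc, fun k hk1 hk2 => absurd hk2 (by omega)⟩

theorem mLoop_spec (xs : List Char) (i l : Nat) :
    l ≤ mLoop xs i l ∧ ¬ Cond xs i (mLoop xs i l) ∧
      ∀ k, l ≤ k → k < mLoop xs i l → Cond xs i k :=
  mLoop_spec_aux xs i (xs.length - l) l (le_refl _)

theorem mLoop_shift (xs : List Char) (i : Nat) (a b : Nat) (hab : a ≤ b)
    (h : ∀ k, a ≤ k → k < b → Cond xs i k) : mLoop xs i a = mLoop xs i b := by
  induction b, hab using Nat.le_induction with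
  | base => rfl
  | succ b hb ih =>
      rw [ih (fun k hk1 hk2 => h k hk1 (by omega)), mLoop_step xs i b (h b hb (by omega))]

theorem rad_bounds (xs : List Char) (i : Nat) (h : i < xs.length) :
    rad xs i ≤ i ∧ i + rad xs i < xs.length := by
  obtain ⟨h1, h2, h3⟩ := mLoop_spec xs i 1
  unfold rad
  rcases Nat.eq_or_lt_of_le h1 with he | hlt
  · constructor <;> omega
  · obtain ⟨c1, c2, -⟩ := h3 (mLoop xs i 1 - 1) (by omega) (by omega)
    constructor <;> omega

theorem rad_palin (xs : List Char) (i : Nat) :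
    ∀ k, k ≤ rad xs i → xs.getD (i + k) ' ' = xs.getD (i - k) ' ' := by
  intro k hk
  rcases Nat.eq_zero_or_pos k with rfl | hpos
  · simp
  · obtain ⟨h1, h2, h3⟩ := mLoop_spec xs i 1
    exact (h3 k hpos (by unfold rad at hk; omega)).2.2

theorem mLoop_eq_rad (xs : List Char) (i l0 : Nat) (hi : i < xs.length)
    (h : ∀ k, 1 ≤ k → k < l0 → Cond xs i k) : mLoop xs i l0 - 1 = rad xs i := by
  unfold rad
  rcases Nat.eq_zero_or_pos l0 with rfl | hpos
  · rw [mLoop_step xs i 0 ⟨by omega, by omega, by simp⟩]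
  · rw [mLoop_shift xs i 1 l0 hpos h]

theorem cond_mirror (xs : List Char) (pos i k : Nat) (hpos : pos < xs.length) (hpi : pos < i)
    (hk1 : i + k < pos + rad xs pos) (hk2 : k < rad xs (pos * 2 - i)) : Cond xs i k := by
  obtain ⟨hb1, hb2⟩ := rad_bounds xs pos hpos
  have hi2p : i < pos * 2 := by omega
  have hmir_lt : pos * 2 - i < xs.length := by omega
  obtain ⟨hm1, hm2⟩ := rad_bounds xs (pos * 2 - i) hmir_lt
  have hki : k < i := by omega
  refine ⟨by omega, by omega, ?_⟩
  have e1 : xs.getD (i + k) ' ' = xs.getD (pos * 2 - i - k) ' ' := by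
    have := rad_palin xs pos (i + k - pos) (by omega)
    rw [show pos + (i + k - pos) = i + k by omega,
        show pos - (i + k - pos) = pos * 2 - i - k by omega] at this
    exact this
  have e2 : xs.getD (pos * 2 - i - k) ' ' = xs.getD (pos * 2 - i + k) ' ' :=
    (rad_palin xs (pos * 2 - i) k (by omega)).symm
  have e3 : xs.getD (pos * 2 - i + k) ' ' = xs.getD (i - k) ' ' := by
    by_cases hc : pos ≤ i - k
    · have := rad_palin xs pos (i - k - pos) (by omega)
      rw [show pos + (i - k - pos) = i - k by omega,
          show pos - (i - k - pos) = pos * 2 - i + k by omega] at this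
      exact this.symm
    · have := rad_palin xs pos (pos - (i - k)) (by omega)
      rw [show pos + (pos - (i - k)) = pos * 2 - i + k by omega,
          show pos - (pos - (i - k)) = i - k by omega] at this
      exact this
  exact e1.trans (e2.trans e3)

theorem getD_set_nat (m : List Nat) (i j a : Nat) (hi : i < m.length) :
    (m.set i a).getD j 0 = if j = i then a else m.getD j 0 := by
  by_cases h : j = i
  · subst h; simp [List.getD_eq_getElem?_getD, hi]
  · have h' : i ≠ j := fun e => h e.symm
    simp [List.getD_eq_getElem?_getD, h, h']

theorem manacherAux_correct (fuel : Nat) (xs : List Char) (m : List Nat) (maxRight pos i : Nat)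
    (hfuel : xs.length - i ≤ fuel) (hlen : m.length = xs.length)
    (hm : ∀ j, j < i → m.getD j 0 = rad xs j)
    (hinv : (pos < i ∧ maxRight = pos + rad xs pos) ∨ (i = 0 ∧ pos = 0 ∧ maxRight = 0)) :
    ∀ j, j < xs.length → (manacherAux fuel xs m maxRight pos i).getD j 0 = rad xs j := by
  induction fuel generalizing m maxRight pos i with
  | zero =>
      intro j hj
      exact hm j (by omega)
  | succ f ih =>
      by_cases hi : i < xs.length
      · rw [manacherAux, if_pos hi]
        simp only []
        set L := mLoop xs i (if maxRight ≤ i then 1 else min (m.getD (pos * 2 - i) 0) (maxRight - i)) - 1 with hL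
        have hLrad : L = rad xs i := by
          rw [hL]
          by_cases hmx : maxRight ≤ i
          · rw [if_pos hmx]
            exact mLoop_eq_rad xs i 1 hi (fun k hk1 hk2 => absurd hk2 (by omega))
          · rw [if_neg hmx]
            rcases hinv with ⟨hpi, hMR⟩ | ⟨hi0, hp0, hmr0⟩
            · have hpn : pos < xs.length := by omega
              obtain ⟨hb1, hb2⟩ := rad_bounds xs pos hpn
              have hmir : pos * 2 - i < i := by omega
              rw [hm (pos * 2 - i) hmir]
              exact mLoop_eq_rad xs i _ hi (fun k hk1 hk2 =>
                cond_mirror xs pos i k hpn hpi (by omega) (by omega))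
            · omega
        have hm' : ∀ j, j < i + 1 → (m.set i L).getD j 0 = rad xs j := by
          intro j hj
          rw [getD_set_nat m i j L (by omega)]
          split_ifs with he
          · rw [he, hLrad]
          · exact hm j (by omega)
        have hlen' : (m.set i L).length = xs.length := by simp [hlen]
        by_cases hup : maxRight < i + L
        · rw [if_pos hup]
          exact ih (m.set i L) (i + L) i (i + 1) (by omega) hlen' hm'
            (Or.inl ⟨by omega, by rw [hLrad]⟩)
        · rw [if_neg hup]
          refine ih (m.set i L) maxRight pos (i + 1) (by omega) hlen' hm' ?_
          rcases hinv with ⟨hpi, hMR⟩ | ⟨hi0, hp0, hmr0⟩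
          · exact Or.inl ⟨by omega, hMR⟩
          · refine Or.inl ⟨by omega, ?_⟩
            subst hi0 hp0 hmr0
            have hz : L = 0 := by omega
            omega
      · intro j hj
        rw [manacherAux, if_neg hi]
        exact hm j (by omega)

theorem manacher_correct (xs : List Char) (j : Nat) (hj : j < xs.length) :
    (manacher xs).getD j 0 = rad xs j :=
  manacherAux_correct xs.length xs (List.replicate xs.length 0) 0 0 0 (by omega)
    (by simp) (fun j hj => absurd hj (by omega)) (Or.inr ⟨rfl, rfl, rfl⟩) j hj

theorem expandPF_eq (xs : List Char) (c : Nat) :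
    ∀ fuel p, xs.length - p ≤ fuel → expandPF fuel xs c p = mLoop xs c (p + 1) - 1
  | 0, p, hf => by
      have hNC : ¬ Cond xs c (p + 1) := by rintro ⟨h1, -, -⟩; omega
      rw [expandPF, mLoop_stop xs c (p + 1) hNC]
      omega
  | fuel + 1, p, hf => by
      by_cases hc : p + 1 ≤ c ∧ c + p + 1 < xs.length ∧ xs.getD (c - (p + 1)) ' ' = xs.getD (c + p + 1) ' '
      · have hCond : Cond xs c (p + 1) :=
          ⟨by omega, hc.1, by rw [show c + (p + 1) = c + p + 1 by omega]; exact hc.2.2.symm⟩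
        rw [expandPF, if_pos hc, mLoop_step xs c (p + 1) hCond]
        exact expandPF_eq xs c fuel (p + 1) (by omega)
      · have hNC : ¬ Cond xs c (p + 1) := by
          rintro ⟨h1, h2, h3⟩
          exact hc ⟨h2, by omega, by rw [show c + p + 1 = c + (p + 1) by omega]; exact h3.symm⟩
        rw [expandPF, if_neg hc, mLoop_stop xs c (p + 1) hNC]
        omega

theorem expandP_eq (xs : List Char) (c p : Nat) : expandP xs c p = mLoop xs c (p + 1) - 1 :=
  expandPF_eq xs c xs.length p (by omega)

theorem colList_getD (A : List String) (n c j : Nat) (hj : j < n) :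
    (((List.range n).map (fun r => getCell A r c)).getD j ' ') = getCell A j c := by
  rw [List.getD_eq_getElem _ _ (by simpa using hj)]
  simp

theorem expandQF_eq (A : List String) (n c : Nat) :
    ∀ fuel q r, expandQF fuel A n r c q = expandPF fuel ((List.range n).map (fun r => getCell A r c)) r q
  | 0, q, r => rfl
  | fuel + 1, q, r => by
      have hlen : ((List.range n).map (fun r => getCell A r c)).length = n := by simp
      by_cases hc : q + 1 ≤ r ∧ r + q + 1 < n ∧ getCell A (r - (q + 1)) c = getCell A (r + q + 1) c
      · have hc' : q + 1 ≤ r ∧ r + q + 1 < ((List.range n).map (fun r => getCell A r c)).length ∧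
            ((List.range n).map (fun r => getCell A r c)).getD (r - (q + 1)) ' ' =
              ((List.range n).map (fun r => getCell A r c)).getD (r + q + 1) ' ' := by
          refine ⟨hc.1, by omega, ?_⟩
          rw [colList_getD A n c _ (by omega), colList_getD A n c _ (by omega)]
          exact hc.2.2
        rw [expandQF, if_pos hc, expandPF, if_pos hc']
        exact expandQF_eq A n c fuel (q + 1) r
      · have hc' : ¬ (q + 1 ≤ r ∧ r + q + 1 < ((List.range n).map (fun r => getCell A r c)).length ∧
            ((List.range n).map (fun r => getCell A r c)).getD (r - (q + 1)) ' ' =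
              ((List.range n).map (fun r => getCell A r c)).getD (r + q + 1) ' ') := by
          rintro ⟨h1, h2, h3⟩
          rw [hlen] at h2
          rw [colList_getD A n c _ (by omega), colList_getD A n c _ (by omega)] at h3
          exact hc ⟨h1, h2, h3⟩
        rw [expandQF, if_neg hc, expandPF, if_neg hc']

theorem expandQ_eq (A : List String) (n r c q : Nat) :
    expandQ A n r c q = expandP ((List.range n).map (fun r => getCell A r c)) r q := by
  unfold expandQ expandP
  rw [expandQF_eq A n c n q r]
  congr 1
  simp

theorem range_map_getD {α : Type} (n i : Nat) (f : Nat → α) (d : α) (h : i < n) :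
    ((List.range n).map f).getD i d = f i := by
  rw [List.getD_eq_getElem _ _ (by simpa using h), List.getElem_map, List.getElem_range]

theorem foldl_fixed_id {α β : Type} (xs : List α) (a : β) : xs.foldl (fun s _ => s) a = a := by
  induction xs <;> simp_all

theorem foldl_add_congr {α β : Type} (xs : List α) (f g : β → α → β) (a b : β) (hab : a = b)
    (h : ∀ s x, x ∈ xs → f s x = g s x) : xs.foldl f a = xs.foldl g b := by
  induction xs generalizing a b with
  | nil => simpa using hab
  | cons y ys ih =>
      simp only [List.foldl_cons]
      exact ih _ _ (hab ▸ h a y (by simp)) (fun s x hx => h s x (by simp [hx]))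

theorem pointwise_min (A : List String) (N M : Int)
    (hN : (N : Int) ≤ A.length) (hrow : ∀ row ∈ A.take N.toNat, (M : Int) ≤ row.length)
    (r c : Nat) (hr : r < N.toNat) (hc : c < M.toNat) :
    min (((A.map (fun row => manacher row.toList)).getD r []).getD c 0)
        (((((List.range M.toNat).map
              (fun c => (List.range N.toNat).map (fun r => ((A.getD r "").toList).getD c ' '))).map
                manacher).getD c []).getD r 0)
      = min (expandP (A.getD r "").toList c 0) (expandQ A N.toNat r c 0) := by
  have hrA : r < A.length := by omega
  have hgd : A.getD r "" = A[r] := List.getD_eq_getElem A "" hrA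
  have hmem : A[r] ∈ A.take N.toNat := by
    have h1 : r < (A.take N.toNat).length := by simp; omega
    have h2 := List.getElem_mem h1
    rwa [List.getElem_take] at h2
  have hMr : (M : Int) ≤ (A[r]).length := hrow _ hmem
  have hcrow : c < (A.getD r "").toList.length := by
    rw [hgd]
    have : (A[r]).toList.length = (A[r]).length := String.length_toList ▸ rfl
    omega
  have eA1 : (A.map (fun row => manacher row.toList)).getD r [] = manacher (A.getD r "").toList := by
    rw [List.getD_eq_getElem _ _ (by simpa using hrA), List.getElem_map, hgd]
  have eC1 : ((((List.range M.toNat).map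
        (fun c => (List.range N.toNat).map (fun r => ((A.getD r "").toList).getD c ' '))).map
          manacher).getD c [])
      = manacher ((List.range N.toNat).map (fun r => getCell A r c)) := by
    rw [List.getD_eq_getElem _ _ (by simp [hc]), List.getElem_map, List.getElem_map,
        List.getElem_range]
    simp [getCell]
  have hcol_len : r < ((List.range N.toNat).map (fun r => getCell A r c)).length := by
    simp [hr]
  rw [eA1, eC1, manacher_correct _ c hcrow, manacher_correct _ r (by simpa using hcol_len),
      expandP_eq, expandQ_eq]
  rw [expandP_eq]
  rfl

-- ===== VERDICT (by name: the statement is the Claim_ definition above) =====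
theorem solve_spec : Claim_equal_solve := by
  intro A N M hdom hpre
  unfold Spec_solve
  show solve A N M = solve_alt A N M
  by_cases hM0 : M ≤ 0
  · have hMn : M.toNat = 0 := by omega
    simp only [solve, solve_alt, if_pos hM0, hMn, List.range_zero, List.foldl_nil]
    rw [foldl_fixed_id]
    ring
  · simp only [solve, solve_alt, if_neg hM0]
    refine foldl_add_congr _ _ _ _ _ (by ring) ?_
    intro s r hrmem
    refine foldl_add_congr _ _ _ _ _ rfl ?_
    intro t c hcmem
    have hr : r < N.toNat := List.mem_range.mp hrmem
    have hc : c < M.toNat := List.mem_range.mp hcmem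
    rcases hpre with hM0' | hN0 | ⟨hN, hrow⟩
    · exact absurd hc (by omega)
    · exact absurd hr (by omega)
    · rw [range_map_getD N.toNat r _ [] hr, range_map_getD M.toNat c _ 0 hc]
      exact congrArg (fun z => t + Int.ofNat z) (pointwise_min A N M hN hrow r c hr hc)
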